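-- pv_equiv track=rewrite | github.com/blodstone/Analisis-dan-Desain-Algoritma | code/TotalGanjil.py | totalGanjil
-- ===== SOURCE A (Python) =====
-- def totalGanjil(A,p,r):
--     if p<r:
--         q = (p+r)//2
--         x = totalGanjil(A,p,q)
--         y = totalGanjil(A,q+1,r)
--         return total(x,y)
--     else:
--         if A[r]%2!=0:
--             return 1
--         else:
--             return 0
--
-- def total(x,y):
--     return x+y
-- ===== SOURCE B (Python) =====
-- def totalGanjil(A, p, r):
--     if p < r:
--         count = 0
--         for i in range(p, r + 1):
--             if A[i] % 2 != 0:
--                 count += 1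
--         return count
--     else:
--         if A[r] % 2 != 0:
--             return 1
--         else:
--             return 0
-- ===== Notes on version B (the rewrite author's own statement) =====
-- stated objective: simpler
-- what changed: Replaced the divide-and-conquer recursion (midpoint split plus a total() helper summing the halves) with a single linear counting loop over range(p, r+1), keeping the p>=r base case unchanged.
import Mathlib
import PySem

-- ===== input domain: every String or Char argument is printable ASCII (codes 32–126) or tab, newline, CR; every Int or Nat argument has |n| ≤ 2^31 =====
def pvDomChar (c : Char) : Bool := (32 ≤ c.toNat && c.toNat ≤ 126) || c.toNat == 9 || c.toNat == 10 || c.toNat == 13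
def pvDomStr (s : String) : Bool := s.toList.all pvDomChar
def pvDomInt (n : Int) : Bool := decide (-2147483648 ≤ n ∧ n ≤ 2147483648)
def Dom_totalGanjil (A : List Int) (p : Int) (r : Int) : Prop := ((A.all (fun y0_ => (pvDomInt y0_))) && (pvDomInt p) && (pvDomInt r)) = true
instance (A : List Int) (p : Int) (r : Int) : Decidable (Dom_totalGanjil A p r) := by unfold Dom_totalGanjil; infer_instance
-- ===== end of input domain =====

-- B replaces A's divide-and-conquer recursion by a single counting loop over range(p, r+1); simpler, same O(n) cost.


-- ===== PORT A =====
-- helper 'total' of A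
def totalFn (x y : Int) : Int := x + y

-- A[r] is pyGet? with default 0; the default is never used under Pre_ (Pre_ guarantees the index is in range).
def totalGanjil (A : List Int) (p : Int) (r : Int) : Int :=
  if h : p < r then
    let q := PySem.Int.floordiv (p + r) 2
    let x := totalGanjil A p q
    let y := totalGanjil A (q + 1) r
    totalFn x y
  else
    if PySem.Int.mod ((PySem.List.pyGet? A r).getD 0) 2 ≠ 0 then 1 else 0
termination_by (r - p).toNat
decreasing_by
  · have h3 : PySem.Int.floordiv (p + r) 2 < r :=
      (PySem.Int.floordiv_lt_iff_lt_mul (by omega)).mpr (by omega)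
    omega
  · have hmid : p ≤ PySem.Int.floordiv (p + r) 2 ∧ PySem.Int.floordiv (p + r) 2 ≤ r :=
      PySem.Int.floordiv_two_mid_bounds (by omega)
    omega

-- ===== PORT B =====
def totalGanjil_alt (A : List Int) (p : Int) (r : Int) : Int :=
  if p < r then
    (PySem.List.pyRange p (r + 1) 1).foldl
      (fun count i => if PySem.Int.mod ((PySem.List.pyGet? A i).getD 0) 2 ≠ 0 then count + 1 else count) 0
  else
    if PySem.Int.mod ((PySem.List.pyGet? A r).getD 0) 2 ≠ 0 then 1 else 0

-- ===== PRECONDITION & SPEC =====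
-- Pre_ excludes exactly the inputs where Python A raises IndexError: every index it touches
-- (p..r when p < r, just r otherwise) must be a valid Python index of A.
def Pre_totalGanjil (A : List Int) (p : Int) (r : Int) : Prop :=
  if p < r then -(A.length : Int) ≤ p ∧ r < A.length
  else -(A.length : Int) ≤ r ∧ r < A.length
instance (A : List Int) (p : Int) (r : Int) : Decidable (Pre_totalGanjil A p r) := by
  unfold Pre_totalGanjil; infer_instance

def pvWitness_totalGanjil : List Int × Int × Int := ([3, 4, 5, 6], 0, 3)

def Spec_totalGanjil (A : List Int) (p : Int) (r : Int) (out : Int) : Prop := out = totalGanjil_alt A p r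
instance (A : List Int) (p : Int) (r : Int) (out : Int) : Decidable (Spec_totalGanjil A p r out) := by unfold Spec_totalGanjil; infer_instance

-- ===== CLAIM (what is proved, stated in full; the proofs are below) =====
def Claim_equal_totalGanjil : Prop := ∀ (A : List Int) (p : Int) (r : Int), Dom_totalGanjil A p r → Pre_totalGanjil A p r → Spec_totalGanjil A p r (totalGanjil A p r)

-- ===== LEMMAS AND PROOFS =====

-- the loop body / base-case indicator
def pvOdd (A : List Int) (i : Int) : Int :=
  if PySem.Int.mod ((PySem.List.pyGet? A i).getD 0) 2 ≠ 0 then 1 else 0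

def pvCnt (A : List Int) (p r : Int) : Int :=
  (PySem.List.pyRange p (r + 1) 1).foldl
    (fun count i => if PySem.Int.mod ((PySem.List.pyGet? A i).getD 0) 2 ≠ 0 then count + 1 else count) 0

theorem pvFoldl_shift (A : List Int) (l : List Int) (a : Int) :
    l.foldl (fun count i => if PySem.Int.mod ((PySem.List.pyGet? A i).getD 0) 2 ≠ 0 then count + 1 else count) a
      = a + l.foldl (fun count i => if PySem.Int.mod ((PySem.List.pyGet? A i).getD 0) 2 ≠ 0 then count + 1 else count) 0 := by
  induction l generalizing a with
  | nil => simp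
  | cons x xs ih =>
      simp only [List.foldl_cons]
      rw [ih, ih (if PySem.Int.mod ((PySem.List.pyGet? A x).getD 0) 2 ≠ 0 then (0:Int) + 1 else 0)]
      split <;> ring

theorem pvRange_split (a b c : Int) (hab : a ≤ b) (hbc : b ≤ c) :
    PySem.List.pyRange a c 1 = PySem.List.pyRange a b 1 ++ PySem.List.pyRange b c 1 := by
  have h : ∀ n : Nat, ∀ a : Int, (b - a).toNat = n → a ≤ b →
      PySem.List.pyRange a c 1 = PySem.List.pyRange a b 1 ++ PySem.List.pyRange b c 1 := by
    intro n
    induction n with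
    | zero =>
        intro a h0 hab
        have hb : a = b := by omega
        subst hb
        rw [PySem.List.pyRange_one_eq_nil (le_refl a)]
        simp
    | succ m ih =>
        intro a h0 hab
        have hlt : a < b := by omega
        rw [PySem.List.pyRange_one_cons (by omega : a < c),
            PySem.List.pyRange_one_cons hlt,
            ih (a + 1) (by omega) (by omega)]
        simp
  exact h (b - a).toNat a rfl hab

theorem pvCnt_split (A : List Int) (p q r : Int) (h1 : p ≤ q) (h2 : q < r) :
    pvCnt A p r = pvCnt A p q + pvCnt A (q + 1) r := by
  unfold pvCnt
  rw [pvRange_split p (q + 1) (r + 1) (by omega) (by omega), List.foldl_append, pvFoldl_shift]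

theorem pvCnt_single (A : List Int) (p : Int) :
    pvCnt A p p = pvOdd A p := by
  unfold pvCnt pvOdd
  rw [PySem.List.pyRange_one_cons (by omega : p < p + 1),
      PySem.List.pyRange_one_eq_nil (le_refl (p + 1))]
  simp only [List.foldl_cons, List.foldl_nil]
  split <;> simp

theorem pvA_eq_cnt (A : List Int) : ∀ (n : Nat) (p r : Int), (r - p).toNat = n → p ≤ r →
    totalGanjil A p r = pvCnt A p r := by
  intro n
  induction n using Nat.strong_induction_on with
  | _ n ih =>
      intro p r hn hpr
      rcases lt_or_eq_of_le hpr with hlt | heq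
      · rw [totalGanjil]
        simp only [hlt, dif_pos]
        have hmid : p ≤ PySem.Int.floordiv (p + r) 2 ∧ PySem.Int.floordiv (p + r) 2 ≤ r :=
          PySem.Int.floordiv_two_mid_bounds (by omega)
        have hq : PySem.Int.floordiv (p + r) 2 < r :=
          (PySem.Int.floordiv_lt_iff_lt_mul (by omega)).mpr (by omega)
        set q := PySem.Int.floordiv (p + r) 2 with hqdef
        rw [ih (q - p).toNat (by omega) p q rfl (by omega),
            ih (r - (q + 1)).toNat (by omega) (q + 1) r rfl (by omega)]
        unfold totalFn
        exact (pvCnt_split A p q r (by omega) hq).symm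
      · subst heq
        rw [totalGanjil]
        simp only [lt_irrefl, dite_false]
        rw [pvCnt_single]
        unfold pvOdd
        rfl

-- ===== VERDICT (by name: the statement is the Claim_ definition above) =====
theorem totalGanjil_spec : Claim_equal_totalGanjil := by
  intro A p r _hdom _hpre
  unfold Spec_totalGanjil totalGanjil_alt
  by_cases h : p < r
  · simp only [h, if_pos]
    have := pvA_eq_cnt A (r - p).toNat p r rfl (le_of_lt h)
    rw [this]; rfl
  · rw [totalGanjil]
    simp [h]
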